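-- pv_equiv track=rewrite | github.com/Asutherland8219/TMU_assignments | Source/labs109.py | remove_after_kth
-- ===== SOURCE A (Python) =====
-- def remove_after_kth(items, k = 1):
--     di = {}
--     li = []
--     for i in items:
--         di[i] = di.get(i, 0) + 1
--         if(di[i] <= k):
--             li.append(i)
--     return li
-- ===== SOURCE B (Python) =====
-- def remove_after_kth(items, k=1):
--     lst = list(items)
--     total = {}
--     for x in lst:
--         total[x] = total.get(x, 0) + 1
--     out = []
--     seen = {}
--     for x in reversed(lst):
--         seen[x] = seen.get(x, 0) + 1
--         if total[x] - seen[x] < k: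
--             out.append(x)
--     out.reverse()
--     return out
-- ===== Notes on version B (the rewrite author's own statement) =====
-- stated objective: alternative
-- what changed: B first builds a total-occurrence counter, then scans the list backwards keeping x when total[x] minus its suffix count (= occurrences strictly before x) is below k, constructing the result back-to-front and reversing it.
import Mathlib
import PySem

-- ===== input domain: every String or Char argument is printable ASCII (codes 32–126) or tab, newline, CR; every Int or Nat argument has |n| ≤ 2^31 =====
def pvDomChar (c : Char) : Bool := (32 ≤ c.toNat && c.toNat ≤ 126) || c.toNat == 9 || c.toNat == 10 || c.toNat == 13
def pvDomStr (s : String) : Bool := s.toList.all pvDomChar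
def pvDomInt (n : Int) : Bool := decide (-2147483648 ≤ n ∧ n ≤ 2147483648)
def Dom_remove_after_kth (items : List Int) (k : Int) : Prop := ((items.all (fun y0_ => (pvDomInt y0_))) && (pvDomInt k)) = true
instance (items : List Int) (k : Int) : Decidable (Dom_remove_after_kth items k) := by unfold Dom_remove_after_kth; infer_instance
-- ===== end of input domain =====

-- B is an alternative O(n) algorithm: it precomputes total occurrence counts, then scans
-- backwards keeping x when total[x] minus its suffix count is below k, building the
-- result back-to-front (same cost as A, different traversal; not claimed faster).


-- ===== PORT A =====
-- for i in items: di[i] = di.get(i,0)+1; if di[i] <= k: li.append(i)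
def remove_after_kth (items : List Int) (k : Int) : List Int :=
  (items.foldl
    (fun (st : PySem.Dict Int Int × List Int) i =>
      let di := st.1.insert i (st.1.getD i 0 + 1)
      if di.getD i 0 ≤ k then (di, st.2 ++ [i]) else (di, st.2))
    (PySem.Dict.empty, [])).2

-- ===== PORT B =====
-- total = counts of whole list; then scan reversed(lst): seen[x] += 1, keep x iff
-- total[x] - seen[x] < k (x is always a key of total, so total[x] is total.getD x 0);
-- out.reverse() at the end.
def remove_after_kth_alt (items : List Int) (k : Int) : List Int :=
  let total := items.foldl (fun (d : PySem.Dict Int Int) x => d.insert x (d.getD x 0 + 1))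
    PySem.Dict.empty
  let st := items.reverse.foldl
    (fun (st : PySem.Dict Int Int × List Int) x =>
      let seen := st.1.insert x (st.1.getD x 0 + 1)
      if total.getD x 0 - seen.getD x 0 < k then (seen, st.2 ++ [x]) else (seen, st.2))
    (PySem.Dict.empty, [])
  st.2.reverse

-- ===== PRECONDITION & SPEC =====
def Spec_remove_after_kth (items : List Int) (k : Int) (out : List Int) : Prop := out = remove_after_kth_alt items k
instance (items : List Int) (k : Int) (out : List Int) : Decidable (Spec_remove_after_kth items k out) := by unfold Spec_remove_after_kth; infer_instance

-- ===== CLAIM =====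
def Claim_equal_remove_after_kth : Prop := ∀ (items : List Int) (k : Int), Dom_remove_after_kth items k → Spec_remove_after_kth items k (remove_after_kth items k)

-- ===== LEMMAS AND PROOFS =====

-- reference form: keep x iff its count in the already-seen prefix is < k
def pvGo (k : Int) (pre : List Int) : List Int → List Int
  | [] => []
  | x :: rest =>
      if (pre.count x : Int) < k then x :: pvGo k (pre ++ [x]) rest
      else pvGo k (pre ++ [x]) rest

theorem pvA_loop (k : Int) (rest : List Int) : ∀ (pre acc : List Int) (d : PySem.Dict Int Int),
    (∀ x, d.getD x 0 = (pre.count x : Int)) →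
    (rest.foldl
      (fun (st : PySem.Dict Int Int × List Int) i =>
        let di := st.1.insert i (st.1.getD i 0 + 1)
        if di.getD i 0 ≤ k then (di, st.2 ++ [i]) else (di, st.2))
      (d, acc)).2 = acc ++ pvGo k pre rest := by
  induction rest with
  | nil => intro pre acc d _; simp [pvGo]
  | cons x rest ih =>
    intro pre acc d hinv
    have hx : (d.insert x (d.getD x 0 + 1)).getD x 0 = (pre.count x : Int) + 1 := by
      rw [PySem.Dict.getD_insert_self, hinv]
    have hinv' : ∀ y, (d.insert x (d.getD x 0 + 1)).getD y 0 = ((pre ++ [x]).count y : Int) := by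
      intro y
      rw [PySem.Dict.getD_insert]
      by_cases hxy : y = x
      · subst hxy; simp [hinv]
      · simp [hxy, hinv, List.count_append, Ne.symm hxy]
    simp only [List.foldl_cons, pvGo]
    by_cases hc : (pre.count x : Int) < k
    · have : (d.insert x (d.getD x 0 + 1)).getD x 0 ≤ k := by omega
      simp only [this, if_pos, hc]
      rw [ih (pre ++ [x]) (acc ++ [x]) _ hinv']
      simp
    · have : ¬ (d.insert x (d.getD x 0 + 1)).getD x 0 ≤ k := by omega
      simp only [this, hc, if_false]
      rw [ih (pre ++ [x]) acc _ hinv']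

-- the total-counter loop computes the count of every value
theorem pvTotal_loop (l : List Int) : ∀ (d : PySem.Dict Int Int) (c : Int → Int),
    (∀ x, d.getD x 0 = c x) →
    ∀ x, (l.foldl (fun (d : PySem.Dict Int Int) x => d.insert x (d.getD x 0 + 1)) d).getD x 0
      = c x + (l.count x : Int) := by
  induction l with
  | nil => intro d c h x; simp [h]
  | cons y l ih =>
    intro d c h x
    simp only [List.foldl_cons]
    have := ih (d.insert y (d.getD y 0 + 1))
      (fun x => if x = y then c y + 1 else c x)
      (by intro x; rw [PySem.Dict.getD_insert]; split_ifs with hxy <;> simp [hxy, h])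
      x
    rw [this]
    by_cases hxy : x = y
    · subst hxy
      simp only [List.count_cons_self]
      push_cast; ring
    · simp [hxy, Ne.symm hxy]

theorem pvGo_snoc (k : Int) (q : List Int) : ∀ (pre : List Int) (x : Int),
    pvGo k pre (q ++ [x])
      = pvGo k pre q ++ (if ((pre ++ q).count x : Int) < k then [x] else []) := by
  induction q with
  | nil => intro pre x; simp [pvGo]
  | cons y q ih =>
    intro pre x
    simp only [List.cons_append, pvGo]
    by_cases hy : (pre.count y : Int) < k
    · simp only [hy, if_pos, ih (pre ++ [y]) x, List.append_assoc, List.cons_append,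
        List.nil_append]
    · simp only [hy, if_false, ih (pre ++ [y]) x, List.append_assoc, List.cons_append,
        List.nil_append]

-- the backward loop produces pvGo's result reversed
theorem pvB_loop (k : Int) (t : PySem.Dict Int Int) (l : List Int) :
    ∀ (done out : List Int) (seen : PySem.Dict Int Int),
    (∀ y, t.getD y 0 = ((l.reverse ++ done).count y : Int)) →
    (∀ y, seen.getD y 0 = (done.count y : Int)) →
    (l.foldl
      (fun (st : PySem.Dict Int Int × List Int) x =>
        let s := st.1.insert x (st.1.getD x 0 + 1)
        if t.getD x 0 - s.getD x 0 < k then (s, st.2 ++ [x]) else (s, st.2))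
      (seen, out)).2 = out ++ (pvGo k [] l.reverse).reverse := by
  induction l with
  | nil => intro done out seen _ _; simp [pvGo]
  | cons x l ih =>
    intro done out seen ht hs
    have hsx : (seen.insert x (seen.getD x 0 + 1)).getD x 0 = (done.count x : Int) + 1 := by
      rw [PySem.Dict.getD_insert_self, hs]
    have hs' : ∀ y, (seen.insert x (seen.getD x 0 + 1)).getD y 0 = ((x :: done).count y : Int) := by
      intro y
      rw [PySem.Dict.getD_insert]
      by_cases hxy : y = x
      · subst hxy; simp [hs]
      · simp [hxy, hs, Ne.symm hxy]
    have ht' : ∀ y, t.getD y 0 = ((l.reverse ++ (x :: done)).count y : Int) := by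
      intro y; rw [ht]; simp [List.count_append]; try omega
    have htx : t.getD x 0 = (l.count x : Int) + 1 + (done.count x : Int) := by
      rw [ht]; simp [List.count_append]; try omega
    have hcond : (t.getD x 0 - (seen.insert x (seen.getD x 0 + 1)).getD x 0 < k)
        ↔ ((l.count x : Int) < k) := by rw [hsx, htx]; omega
    have hrev : (pvGo k [] ((x :: l).reverse)).reverse
        = (if (l.count x : Int) < k then [x] else []) ++ (pvGo k [] l.reverse).reverse := by
      have h2 := pvGo_snoc k l.reverse ([] : List Int) x
      simp only [List.nil_append] at h2
      rw [List.reverse_cons, h2, List.reverse_append]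
      simp only [List.count_reverse]
      split_ifs <;> simp
    simp only [List.foldl_cons]
    by_cases hc : (l.count x : Int) < k
    · have hcnd : t.getD x 0 - (seen.insert x (seen.getD x 0 + 1)).getD x 0 < k := hcond.mpr hc
      simp only [hcnd, if_pos]
      rw [ih (x :: done) (out ++ [x]) _ ht' hs', hrev, if_pos hc]
      simp
    · have hcnd : ¬ t.getD x 0 - (seen.insert x (seen.getD x 0 + 1)).getD x 0 < k := by
        rw [hcond]; exact hc
      simp only [hcnd, if_false]
      rw [ih (x :: done) out _ ht' hs', hrev, if_neg hc]
      simp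

-- ===== VERDICT =====
theorem remove_after_kth_spec : Claim_equal_remove_after_kth := by
  intro items k _
  unfold Spec_remove_after_kth remove_after_kth remove_after_kth_alt
  dsimp only
  rw [pvA_loop k items [] [] PySem.Dict.empty (by intro x; simp [PySem.Dict.getD_empty])]
  have htot : ∀ y,
      (items.foldl (fun (d : PySem.Dict Int Int) x => d.insert x (d.getD x 0 + 1))
        PySem.Dict.empty).getD y 0 = ((items.reverse.reverse ++ ([] : List Int)).count y : Int) := by
    intro y
    have := pvTotal_loop items PySem.Dict.empty (fun _ => 0)
      (by intro x; simp [PySem.Dict.getD_empty]) y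
    simpa using this
  rw [pvB_loop k _ items.reverse [] [] PySem.Dict.empty htot
    (by intro y; simp [PySem.Dict.getD_empty])]
  simp
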